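-- pv_equiv track=rewrite | github.com/GiWoonHwang/Coding-test | programmers/kantonabit.py | f
-- ===== SOURCE A (Python) =====
-- def f(n,k):
--     if n == 1:
--         return k if k <= 2 else k - 1
--
--     div = 5 ** (n-1)
--     mul = 4 ** (n-1)
--     loc = k // div  # 5개로 나누었을 때 인덱스 위치 (인덱스는 0부터 시작한다)
--
--     # k가 5의 배수라면 loc이 가르키는 인덱스의 바로 전 인덱스 끝 값에 위치하게 된다.
--     # k = 10,  div = 5   10 % 5 == 0  ->  세 번째 그룹이 아닌 두 번 째 그룹에 마지막에 위치한다.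
--     if k % div == 0:
--         loc -= 1
--
--     # 첫 두구간
--     # 5개로 나누어진 구간 + 다음 구간의 위치에 해당하는 인덱스
--     if loc <2:
--         return mul * loc + f(n-1, k - mul * div )
--
--     # 0만 존재하는 구간
--     elif loc == 2:
--         return mul * loc
--
--     # 마지막 두 구간, 1의 개수를 구할 때 곱하길르 하기 때문에 0인 구간을 포함시키지 않아야 한다.
--     else:
--         return mul * (loc -1) + + f(n-1, k - mul * div )
-- ===== SOURCE B (Python) =====
-- def f(n, k):
--     acc = 0
--     while n > 1:
--         div = 5 ** (n - 1)
--         mul = 4 ** (n - 1)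
--         loc = k // div
--         if k % div == 0:
--             loc -= 1
--         if loc == 2:
--             return acc + mul * loc
--         if loc < 2:
--             acc += mul * loc
--         else:
--             acc += mul * (loc - 1)
--         k -= mul * div
--         n -= 1
--     return acc + (k if k <= 2 else k - 1)
-- ===== Notes on version B (the rewrite author's own statement) =====
-- stated objective: simpler
-- what changed: Replaced A's recursion (which rebuilds the result on the way back up) by a single while-loop with an accumulator, checking the loc==2 early-exit first.
import Mathlib
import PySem

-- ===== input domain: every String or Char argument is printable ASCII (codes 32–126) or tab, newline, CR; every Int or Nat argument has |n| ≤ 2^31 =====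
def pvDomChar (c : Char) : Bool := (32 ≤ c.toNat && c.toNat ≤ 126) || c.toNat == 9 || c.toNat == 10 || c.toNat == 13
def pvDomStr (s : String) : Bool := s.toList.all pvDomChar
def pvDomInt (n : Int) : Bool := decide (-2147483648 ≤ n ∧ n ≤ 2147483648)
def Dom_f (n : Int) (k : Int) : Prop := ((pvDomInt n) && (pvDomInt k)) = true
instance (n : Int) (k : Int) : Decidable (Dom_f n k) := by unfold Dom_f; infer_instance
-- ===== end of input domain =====

-- B replaces A's recursion on n by a single accumulator loop (same arithmetic per level); objective: simpler, no speed claim.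

-- ===== PORT A =====
-- Literal port of A's recursion; the `n ≤ 1 → 0` guard only makes the recursion
-- total (Python raises there after recursing past n = 1), it is outside Pre_f.
def f (n : Int) (k : Int) : Int :=
  if n = 1 then (if k ≤ 2 then k else k - 1)
  else if _h : n ≤ 1 then 0
  else
    let div := (5 : Int) ^ (n - 1).toNat
    let mul := (4 : Int) ^ (n - 1).toNat
    let loc0 := PySem.Int.floordiv k div
    let loc := if PySem.Int.mod k div = 0 then loc0 - 1 else loc0
    if loc < 2 then mul * loc + f (n - 1) (k - mul * div)
    else if loc = 2 then mul * loc
    else mul * (loc - 1) + f (n - 1) (k - mul * div)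
termination_by n.toNat
decreasing_by all_goals omega

-- ===== PORT B =====
-- the while-loop of Source B: state (n, k, acc)
def fLoop (n : Int) (k : Int) (acc : Int) : Int :=
  if _h : n > 1 then
    let div := (5 : Int) ^ (n - 1).toNat
    let mul := (4 : Int) ^ (n - 1).toNat
    let loc0 := PySem.Int.floordiv k div
    let loc := if PySem.Int.mod k div = 0 then loc0 - 1 else loc0
    if loc = 2 then acc + mul * loc
    else
      let acc' := if loc < 2 then acc + mul * loc else acc + mul * (loc - 1)
      fLoop (n - 1) (k - mul * div) acc'
  else acc + (if k ≤ 2 then k else k - 1)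
termination_by n.toNat
decreasing_by all_goals omega

def f_alt (n : Int) (k : Int) : Int := fLoop n k 0

-- ===== PRECONDITION & SPEC =====
-- Pre_f excludes n ≤ 0, where Python A recurses with float powers of 5 and
-- eventually raises ZeroDivisionError (float floor division by zero).
def Pre_f (n : Int) (k : Int) : Prop := 1 ≤ n
instance (n : Int) (k : Int) : Decidable (Pre_f n k) := by unfold Pre_f; infer_instance
def pvWitness_f : Int × Int := (3, 17)

def Spec_f (n : Int) (k : Int) (out : Int) : Prop := out = f_alt n k
instance (n : Int) (k : Int) (out : Int) : Decidable (Spec_f n k out) := by unfold Spec_f; infer_instance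

-- ===== CLAIM (what is proved, stated in full; the proofs are below) =====
def Claim_equal_f : Prop := ∀ (n : Int) (k : Int), Dom_f n k → Pre_f n k → Spec_f n k (f n k)

-- ===== LEMMAS AND PROOFS =====

-- loop invariant: for 1 ≤ n the loop computes acc + (A's recursive value)
theorem fLoop_eq (n : Int) (hn : 1 ≤ n) : ∀ (k acc : Int), fLoop n k acc = acc + f n k := by
  induction n, hn using Int.le_induction with
  | base =>
      intro k acc
      rw [fLoop, f]
      simp
  | succ n hn ih =>
      intro k acc
      rw [fLoop, f]
      have h1 : ¬ (n + 1 = 1) := by omega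
      have h2 : ¬ (n + 1 ≤ 1) := by omega
      have h3 : n + 1 > 1 := by omega
      simp only [h1, h2, h3, if_false, dif_pos]
      set div := (5 : Int) ^ (n + 1 - 1).toNat with hdiv
      set mul := (4 : Int) ^ (n + 1 - 1).toNat with hmul
      set loc := (if PySem.Int.mod k div = 0 then PySem.Int.floordiv k div - 1
                  else PySem.Int.floordiv k div) with hloc
      have hrec : n + 1 - 1 = n := by ring
      by_cases hl2 : loc = 2
      · simp [hl2]
      · by_cases hlt : loc < 2
        · simp only [hlt, hl2, hrec, ih, dif_neg not_false, if_true, if_false]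
          ring
        · simp only [hlt, hl2, hrec, ih, dif_neg not_false, if_false]
          ring

-- ===== VERDICT (by name: the statement is the Claim_ definition above) =====
theorem f_spec : Claim_equal_f := by
  intro n k _ hpre
  unfold Spec_f f_alt
  rw [fLoop_eq n hpre k 0, zero_add]
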